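-- pv_equiv track=rewrite | github.com/retromorph/advanced-algorithms | notebooks/tmp.py | max_mex_matrix
-- ===== SOURCE A (Python) =====
-- def prepend(matrix):
--     a1 = [[0] + row for row in matrix]
--     a2 = [[0] * (len(matrix[0]) + 1)]
--     return a2 + a1
--
-- def append(matrix):
--     a1 = [row + [0] for row in matrix]
--     a2 = [[0] * (len(matrix[0]) + 1)]
--     return a1+a2
--
-- def max_mex_matrix(n):
--     if n == 1:
--         return [[0]]
--
--     k = (n - 1)**2
--
--     if n % 2 == 0:
--         matrix = append(max_mex_matrix(n - 1))
--         for i in range(n - 1):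
--             matrix[i][n - 1] = k
--             k += 1
--
--         for i in range(n):
--             matrix[n - 1][i] = k
--             k += 1
--         return matrix
--
--     matrix = prepend(max_mex_matrix(n - 1))
--     for i in range(1, n):
--         matrix[0][i] = k
--         k += 1
--
--     for i in range(1, n):
--         matrix[i][0] = k
--         k += 1
--
--     matrix[0][0] = k
--     return matrix
-- ===== SOURCE B (Python) =====
-- def write_layer(M, half, m):
--     # write the border added at step m directly into the full matrix
--     o = half - (m + 1) // 2
--     k = (m - 1) ** 2
--     if m % 2 == 0:
--         for i in range(m - 1):
--             M[o + i][o + m - 1] = k + i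
--         for j in range(m):
--             M[o + m - 1][o + j] = k + m - 1 + j
--     else:
--         for j in range(1, m):
--             M[o][o + j] = k + j - 1
--         for i in range(1, m):
--             M[o + i][o] = k + m - 2 + i
--         M[o][o] = m * m - 1
--     return M
--
-- def max_mex_matrix(n):
--     half = (n + 1) // 2
--     M = [[0] * n for _ in range(n)]
--     for m in range(2, n + 1):
--         M = write_layer(M, half, m)
--     return M
-- ===== Notes on version B (the rewrite author's own statement) =====
-- stated objective: faster
-- what changed: B replaces A's recursion that rebuilds and copies a fresh bordered matrix at every level with a single preallocated n x n zero matrix into which each layer's border values are written in place at an offset derived in closed form ((n+1)//2 - (m+1)//2), eliminating all list copying.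
import Mathlib
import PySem

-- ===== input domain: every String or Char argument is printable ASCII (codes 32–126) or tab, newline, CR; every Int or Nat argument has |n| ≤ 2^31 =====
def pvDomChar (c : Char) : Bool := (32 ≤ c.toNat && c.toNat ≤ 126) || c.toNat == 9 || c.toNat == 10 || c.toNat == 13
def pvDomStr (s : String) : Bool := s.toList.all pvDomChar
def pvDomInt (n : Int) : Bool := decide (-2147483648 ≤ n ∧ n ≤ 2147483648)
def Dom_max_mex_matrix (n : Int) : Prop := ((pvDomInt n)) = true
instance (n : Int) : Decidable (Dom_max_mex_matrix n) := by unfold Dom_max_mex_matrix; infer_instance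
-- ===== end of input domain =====

-- B replaces A's recursive rebuild-and-copy bordering by one preallocated n×n matrix into which each
-- layer's border values are written in place (derived offset formula); equivalence of the RETURN values.

-- ===== PORT A =====
-- matrix[i][j] = v  (indices are nonnegative and in range at every use admitted by Pre_, so .set is exact)
def set2 (M : List (List Int)) (i j : Nat) (v : Int) : List (List Int) :=
  M.modify i (fun row => row.set j v)

-- A's helper prepend; matrix is nonempty at every call site, so headD [] = matrix[0] exactly
def prependA (m : List (List Int)) : List (List Int) :=
  ([List.replicate ((m.headD []).length + 1) (0 : Int)]) ++ (m.map (fun row => [(0 : Int)] ++ row))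

-- A's helper append
def appendA (m : List (List Int)) : List (List Int) :=
  (m.map (fun row => row ++ [(0 : Int)])) ++ ([List.replicate ((m.headD []).length + 1) (0 : Int)])

def max_mex_matrix (n : Int) : List (List Int) :=
  if _h1 : n = 1 then [[0]]
  else if _h2 : n < 1 then []   -- totality guard only: Python's recursion never returns here (outside Pre_)
  else
    let k := (n - 1) ^ 2
    if PySem.Int.mod n 2 == 0 then
      let matrix := appendA (max_mex_matrix (n - 1))
      let s1 := (PySem.List.pyRange 0 (n - 1) 1).foldl
        (fun (st : List (List Int) × Int) i => (set2 st.1 i.toNat (n - 1).toNat st.2, st.2 + 1)) (matrix, k)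
      let s2 := (PySem.List.pyRange 0 n 1).foldl
        (fun (st : List (List Int) × Int) i => (set2 st.1 (n - 1).toNat i.toNat st.2, st.2 + 1)) s1
      s2.1
    else
      let matrix := prependA (max_mex_matrix (n - 1))
      let s1 := (PySem.List.pyRange 1 n 1).foldl
        (fun (st : List (List Int) × Int) i => (set2 st.1 0 i.toNat st.2, st.2 + 1)) (matrix, k)
      let s2 := (PySem.List.pyRange 1 n 1).foldl
        (fun (st : List (List Int) × Int) i => (set2 st.1 i.toNat 0 st.2, st.2 + 1)) s1
      set2 s2.1 0 0 s2.2
termination_by n.toNat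
decreasing_by all_goals omega

-- ===== PORT B =====
-- Source B's write_layer: writes the border added at step m directly into the full matrix
def write_layer (M : List (List Int)) (half m : Int) : List (List Int) :=
  let o := half - PySem.Int.floordiv (m + 1) 2
  let k := (m - 1) ^ 2
  if PySem.Int.mod m 2 == 0 then
    let M := (PySem.List.pyRange 0 (m - 1) 1).foldl
      (fun M i => set2 M (o + i).toNat (o + m - 1).toNat (k + i)) M
    (PySem.List.pyRange 0 m 1).foldl
      (fun M j => set2 M (o + m - 1).toNat (o + j).toNat (k + m - 1 + j)) M
  else
    let M := (PySem.List.pyRange 1 m 1).foldl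
      (fun M j => set2 M o.toNat (o + j).toNat (k + j - 1)) M
    let M := (PySem.List.pyRange 1 m 1).foldl
      (fun M i => set2 M (o + i).toNat o.toNat (k + m - 2 + i)) M
    set2 M o.toNat o.toNat (m * m - 1)

def max_mex_matrix_alt (n : Int) : List (List Int) :=
  let half := PySem.Int.floordiv (n + 1) 2
  let M := (PySem.List.pyRange 0 n 1).map (fun _ => List.replicate n.toNat (0 : Int))
  (PySem.List.pyRange 2 (n + 1) 1).foldl (fun M m => write_layer M half m) M

-- ===== PRECONDITION & SPEC =====
-- A recurses on n-1 without a base case below 1, so it terminates exactly for n ≥ 1.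
def Pre_max_mex_matrix (n : Int) : Prop := 1 ≤ n
instance (n : Int) : Decidable (Pre_max_mex_matrix n) := by unfold Pre_max_mex_matrix; infer_instance
def pvWitness_max_mex_matrix : Int := 3

def Spec_max_mex_matrix (n : Int) (out : List (List Int)) : Prop := out = max_mex_matrix_alt n
instance (n : Int) (out : List (List Int)) : Decidable (Spec_max_mex_matrix n out) := by
  unfold Spec_max_mex_matrix; infer_instance

-- ===== CLAIM (what is proved, stated in full; the proofs are below) =====
def Claim_equal_max_mex_matrix : Prop :=
  ∀ (n : Int), Dom_max_mex_matrix n → Pre_max_mex_matrix n →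
    Spec_max_mex_matrix n (max_mex_matrix n)

-- ===== LEMMAS AND PROOFS =====

-- entry (i,j) of a matrix, 2-dimensional shape, and embedding of a small square at offset (o,o) in zeros
def get2 (M : List (List Int)) (i j : Nat) : Int := (M[i]?.getD [])[j]?.getD 0

def Sq (M : List (List Int)) (s : Nat) : Prop :=
  M.length = s ∧ ∀ k, k < s → (M[k]?.getD []).length = s

lemma set2_getD (M : List (List Int)) (r c : Nat) (v : Int) (i : Nat) :
    (set2 M r c v)[i]?.getD [] = if r = i then (M[i]?.getD []).set c v else M[i]?.getD [] := by
  simp only [set2, List.getElem?_modify]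
  split <;> cases h : M[i]? <;> simp_all

lemma setD_getD (l : List Int) (c : Nat) (v : Int) (j : Nat) :
    (l.set c v)[j]?.getD 0 = if c = j ∧ c < l.length then v else l[j]?.getD 0 := by
  by_cases h2 : c < l.length
  · rw [List.getElem?_set]
    by_cases h1 : c = j
    · subst h1; simp [h2]
    · simp [h1]
  · rw [List.set_eq_of_length_le (by omega)]
    simp [h2]

lemma append_zero_getD (l : List Int) (j : Nat) :
    (l ++ [(0 : Int)])[j]?.getD 0 = if j < l.length then l[j]?.getD 0 else 0 := by
  rcases Nat.lt_trichotomy j l.length with h | h | h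
  · simp [List.getElem?_append_left h, h]
  · subst h
    rw [List.getElem?_append_right (Nat.le_refl _)]
    simp
  · rw [List.getElem?_eq_none (by simp; omega), List.getElem?_eq_none (by omega)]
    simp

lemma cons_zero_getD (l : List Int) (j : Nat) :
    ((0 : Int) :: l)[j]?.getD 0 = if j = 0 then 0 else l[j - 1]?.getD 0 := by
  cases j <;> simp

lemma replicate_getD (n j : Nat) : (List.replicate n (0 : Int))[j]?.getD 0 = 0 := by
  by_cases h : j < n
  · simp [List.getElem?_replicate, h]
  · rw [List.getElem?_eq_none (by simpa using Nat.le_of_not_lt h)]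
    rfl

def emb (o s : Nat) (X : List (List Int)) : List (List Int) :=
  (List.range s).map (fun i => (List.range s).map (fun j =>
    if o ≤ i ∧ i < o + X.length ∧ o ≤ j ∧ j < o + X.length then get2 X (i - o) (j - o) else 0))

lemma Sq_set2 {M : List (List Int)} {s : Nat} (h : Sq M s) (i j : Nat) (v : Int) :
    Sq (set2 M i j v) s := by
  obtain ⟨hlen, hrow⟩ := h
  refine ⟨by simpa [set2] using hlen, fun k hk => ?_⟩
  rw [set2_getD]
  split
  · rw [List.length_set]; exact hrow k hk
  · exact hrow k hk

lemma get2_set2 {M : List (List Int)} {s r c : Nat} (hS : Sq M s) (hr : r < s) (hc : c < s)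
    (v : Int) (i j : Nat) :
    get2 (set2 M r c v) i j = if i = r ∧ j = c then v else get2 M i j := by
  unfold get2
  rw [set2_getD]
  split
  · next heq =>
    subst heq
    rw [setD_getD]
    have hrl := hS.2 r hr
    by_cases hj : j = c
    · rw [if_pos (by omega), if_pos (by omega)]
    · rw [if_neg (by omega), if_neg (by omega)]
  · next hne =>
    rw [if_neg (by omega)]

lemma mat_ext {M N : List (List Int)} {s : Nat} (hM : Sq M s) (hN : Sq N s)
    (h : ∀ i j, i < s → j < s → get2 M i j = get2 N i j) : M = N := by
  have hlen : M.length = N.length := by rw [hM.1, hN.1]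
  apply List.ext_getElem hlen
  intro i hi hi2
  have his : i < s := by rw [← hM.1]; exact hi
  have hMi : M[i]?.getD [] = M[i] := by rw [List.getElem?_eq_getElem hi]; rfl
  have hNi : N[i]?.getD [] = N[i] := by rw [List.getElem?_eq_getElem hi2]; rfl
  have hMrow : M[i].length = s := by rw [← hMi]; exact hM.2 i his
  have hNrow : N[i].length = s := by rw [← hNi]; exact hN.2 i his
  apply List.ext_getElem (by omega)
  intro j hj hj2
  have hjs : j < s := by omega
  have hval := h i j his hjs
  unfold get2 at hval
  rw [hMi, hNi, List.getElem?_eq_getElem hj, List.getElem?_eq_getElem hj2] at hval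
  simpa using hval

lemma Sq_emb (o s : Nat) (X : List (List Int)) : Sq (emb o s X) s := by
  constructor
  · simp [emb]
  · intro k hk
    simp [emb, List.getElem?_map, List.getElem?_range, hk]

lemma get2_emb {o s i j : Nat} (X : List (List Int)) (hi : i < s) (hj : j < s) :
    get2 (emb o s X) i j =
      if o ≤ i ∧ i < o + X.length ∧ o ≤ j ∧ j < o + X.length then get2 X (i - o) (j - o) else 0 := by
  unfold emb
  simp [get2, List.getElem?_map, List.getElem?_range, hi, hj]

lemma emb_zero_self {X : List (List Int)} {s : Nat} (hX : Sq X s) : emb 0 s X = X := by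
  refine mat_ext (Sq_emb 0 s X) hX ?_
  intro i j hi hj
  rw [get2_emb X hi hj]
  simp [hX.1, hi, hj]

lemma get2_single_zero (a b : Nat) : get2 [[(0 : Int)]] a b = 0 := by
  match a, b with
  | 0, 0 => rfl
  | 0, b + 1 => rfl
  | a + 1, b => rfl

lemma emb_single_zero {o s : Nat} (h : o + 1 ≤ s) :
    emb o s [[0]] = List.replicate s (List.replicate s (0 : Int)) := by
  refine mat_ext (Sq_emb o s _) ⟨by simp, fun k hk => ?_⟩ ?_
  · simp [List.getElem?_replicate, hk]
  · intro i j hi hj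
    rw [get2_emb _ hi hj]
    have : get2 (List.replicate s (List.replicate s (0:Int))) i j = 0 := by
      unfold get2
      rw [List.getElem?_replicate]
      simp only [hi, if_pos]
      exact replicate_getD s j
    rw [this]
    split
    · exact get2_single_zero _ _
    · rfl

lemma headD_len {X : List (List Int)} {s : Nat} (hX : Sq X s) (hs : 1 ≤ s) :
    (X.headD []).length = s := by
  have h0 := hX.2 0 hs
  cases X with
  | nil => exact absurd hX.1 (by simp; omega)
  | cons a l => simpa using h0

lemma row_appendA {X : List (List Int)} {s : Nat} (hX : Sq X s) (hs : 1 ≤ s) (k : Nat)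
    (hk : k < s + 1) :
    (appendA X)[k]?.getD [] =
      if k < s then (X[k]?.getD []) ++ [(0 : Int)] else List.replicate (s + 1) 0 := by
  have hh : (X.headD []).length = s := headD_len hX hs
  unfold appendA
  rw [hh]
  by_cases h : k < s
  · rw [List.getElem?_append_left (by simp [hX.1]; omega), List.getElem?_map]
    cases hx : X[k]? with
    | none =>
      rw [List.getElem?_eq_none_iff] at hx
      rw [hX.1] at hx
      omega
    | some r => simp [h, hx]
  · have hk' : k = s := by omega
    subst hk'
    rw [List.getElem?_append_right (by simp [hX.1])]
    simp [hX.1, h]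

lemma row_prependA {X : List (List Int)} {s : Nat} (hX : Sq X s) (hs : 1 ≤ s) (k : Nat)
    (hk : k < s + 1) :
    (prependA X)[k]?.getD [] =
      if k = 0 then List.replicate (s + 1) 0 else (0 : Int) :: (X[k - 1]?.getD []) := by
  have hh : (X.headD []).length = s := headD_len hX hs
  unfold prependA
  rw [hh]
  cases k with
  | zero => simp
  | succ k =>
    rw [List.getElem?_append_right (by simp)]
    simp only [List.length_singleton]
    rw [List.getElem?_map]
    cases hx : X[k + 1 - 1]? with
    | none =>
      rw [List.getElem?_eq_none_iff] at hx
      rw [hX.1] at hx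
      omega
    | some r => simp [hx]

lemma Sq_appendA {X : List (List Int)} {s : Nat} (hX : Sq X s) (hs : 1 ≤ s) :
    Sq (appendA X) (s + 1) := by
  refine ⟨by simp [appendA, hX.1], fun k hk => ?_⟩
  rw [row_appendA hX hs k hk]
  split
  · simp [hX.2 k ‹k < s›]
  · simp

lemma Sq_prependA {X : List (List Int)} {s : Nat} (hX : Sq X s) (hs : 1 ≤ s) :
    Sq (prependA X) (s + 1) := by
  refine ⟨by simp [prependA, hX.1], fun k hk => ?_⟩
  rw [row_prependA hX hs k hk]
  split
  · simp
  · simp [hX.2 (k - 1) (by omega)]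

lemma get2_appendA {X : List (List Int)} {s : Nat} (hX : Sq X s) (hs : 1 ≤ s) (i j : Nat)
    (hi : i < s + 1) (hj : j < s + 1) :
    get2 (appendA X) i j = if i < s ∧ j < s then get2 X i j else 0 := by
  unfold get2
  rw [row_appendA hX hs i hi]
  by_cases h : i < s
  · rw [if_pos h, append_zero_getD, hX.2 i h]
    by_cases hj' : j < s
    · rw [if_pos hj', if_pos ⟨h, hj'⟩]
    · rw [if_neg hj', if_neg (by omega)]
  · rw [if_neg h, if_neg (by omega)]
    exact replicate_getD (s + 1) j

lemma get2_prependA {X : List (List Int)} {s : Nat} (hX : Sq X s) (hs : 1 ≤ s) (i j : Nat)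
    (hi : i < s + 1) (hj : j < s + 1) :
    get2 (prependA X) i j = if 1 ≤ i ∧ 1 ≤ j then get2 X (i - 1) (j - 1) else 0 := by
  unfold get2
  rw [row_prependA hX hs i hi]
  by_cases h : i = 0
  · rw [if_pos h, if_neg (by omega)]
    exact replicate_getD (s + 1) j
  · rw [if_neg h, cons_zero_getD]
    by_cases hj' : j = 0
    · rw [if_pos hj', if_neg (by omega)]
    · rw [if_neg hj', if_pos (by omega)]

lemma emb_appendA {X : List (List Int)} {s o t : Nat} (hX : Sq X s) (hs : 1 ≤ s)
    (hfit : o + s + 1 ≤ t) : emb o t (appendA X) = emb o t X := by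
  have hSA := Sq_appendA hX hs
  refine mat_ext (Sq_emb o t _) (Sq_emb o t _) ?_
  intro i j hi hj
  rw [get2_emb _ hi hj, get2_emb _ hi hj, hSA.1, hX.1]
  by_cases h2 : o ≤ i ∧ i < o + s ∧ o ≤ j ∧ j < o + s
  · rw [if_pos (by omega), if_pos h2, get2_appendA hX hs _ _ (by omega) (by omega),
      if_pos (by omega)]
  · by_cases h1 : o ≤ i ∧ i < o + (s + 1) ∧ o ≤ j ∧ j < o + (s + 1)
    · rw [if_pos h1, if_neg h2, get2_appendA hX hs _ _ (by omega) (by omega), if_neg (by omega)]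
    · rw [if_neg h1, if_neg h2]

lemma emb_prependA {X : List (List Int)} {s o t : Nat} (hX : Sq X s) (hs : 1 ≤ s)
    (hfit : o + s + 1 ≤ t) : emb o t (prependA X) = emb (o + 1) t X := by
  have hSA := Sq_prependA hX hs
  refine mat_ext (Sq_emb o t _) (Sq_emb (o + 1) t _) ?_
  intro i j hi hj
  rw [get2_emb _ hi hj, get2_emb _ hi hj, hSA.1, hX.1]
  by_cases h2 : o + 1 ≤ i ∧ i < o + 1 + s ∧ o + 1 ≤ j ∧ j < o + 1 + s
  · rw [if_pos (by omega), if_pos h2, get2_prependA hX hs _ _ (by omega) (by omega),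
      if_pos (by omega), Nat.sub_sub, Nat.sub_sub]
  · by_cases h1 : o ≤ i ∧ i < o + (s + 1) ∧ o ≤ j ∧ j < o + (s + 1)
    · rw [if_pos h1, if_neg h2, get2_prependA hX hs _ _ (by omega) (by omega), if_neg (by omega)]
    · rw [if_neg h1, if_neg h2]

lemma emb_set2 {X : List (List Int)} {u o s r c : Nat} (hX : Sq X u) (hr : r < u) (hc : c < u)
    (hfit : o + u ≤ s) (v : Int) :
    set2 (emb o s X) (o + r) (o + c) v = emb o s (set2 X r c v) := by
  have hlen2 : (set2 X r c v).length = u := (Sq_set2 hX r c v).1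
  refine mat_ext (Sq_set2 (Sq_emb o s X) _ _ v) (Sq_emb o s _) ?_
  intro i j hi hj
  rw [get2_set2 (Sq_emb o s X) (by omega) (by omega) v i j,
    get2_emb _ hi hj, get2_emb _ hi hj, hlen2, hX.1]
  by_cases hij : i = o + r ∧ j = o + c
  · rw [if_pos hij, if_pos (by omega), get2_set2 hX hr hc, if_pos (by omega)]
  · rw [if_neg hij]
    by_cases hw : o ≤ i ∧ i < o + u ∧ o ≤ j ∧ j < o + u
    · rw [if_pos hw, if_pos hw, get2_set2 hX hr hc, if_neg (by omega)]
    · rw [if_neg hw, if_neg hw]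

-- a loop 'M[…] = k; k += 1' equals indexed writes k0 + (i - a)
lemma foldl_counter (step : List (List Int) → Int → Int → List (List Int)) :
    ∀ (c : Nat) (a b k0 : Int), (b - a).toNat = c → a ≤ b → ∀ (M : List (List Int)),
    (PySem.List.pyRange a b 1).foldl (fun st i => (step st.1 i st.2, st.2 + 1)) (M, k0)
      = ((PySem.List.pyRange a b 1).foldl (fun M i => step M i (k0 + (i - a))) M, k0 + (b - a)) := by
  intro c
  induction c with
  | zero =>
    intro a b k0 hc hab M
    have hba : b = a := by omega
    subst hba
    rw [PySem.List.pyRange_one_eq_nil (le_refl b)]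
    simp
  | succ c ih =>
    intro a b k0 hc hab M
    have hab' : a < b := by omega
    rw [PySem.List.pyRange_one_cons hab']
    simp only [List.foldl_cons]
    rw [ih (a + 1) b (k0 + 1) (by omega) (by omega)]
    simp only [Prod.mk.injEq]
    refine ⟨?_, by ring⟩
    rw [show k0 + (a - a) = k0 by ring]
    apply PySem.List.foldl_congr_mem
    intro acc x _
    rw [show k0 + 1 + (x - (a + 1)) = k0 + (x - a) by ring]

lemma Sq_foldl_set2 {s : Nat} (L : List Int) (p q : Int → Nat) (val : Int → Int)
    {X : List (List Int)} (hX : Sq X s) :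
    Sq (L.foldl (fun M i => set2 M (p i) (q i) (val i)) X) s := by
  induction L generalizing X with
  | nil => simpa
  | cons a L ih =>
    simp only [List.foldl_cons]
    exact ih (Sq_set2 hX _ _ _)

lemma foldl_set2_emb {u o s : Nat} (L : List Int) (p q : Int → Nat) (val : Int → Int)
    {X : List (List Int)} (hX : Sq X u) (hfit : o + u ≤ s)
    (hpos : ∀ i ∈ L, p i < u ∧ q i < u) :
    L.foldl (fun M i => set2 M (o + p i) (o + q i) (val i)) (emb o s X)
      = emb o s (L.foldl (fun M i => set2 M (p i) (q i) (val i)) X) := by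
  induction L generalizing X with
  | nil => simp
  | cons a L ih =>
    simp only [List.foldl_cons]
    rw [emb_set2 hX (hpos a (List.mem_cons_self ..)).1 (hpos a (List.mem_cons_self ..)).2 hfit]
    exact ih (Sq_set2 hX _ _ _) (fun i hi => hpos i (List.mem_cons_of_mem _ hi))

-- the two bordering steps of A, zeta-reduced to named functions (closed under set2/appendA/prependA)
def stepsEven (n : Int) (X : List (List Int)) : List (List Int) :=
  ((PySem.List.pyRange 0 n 1).foldl
      (fun (st : List (List Int) × Int) i => (set2 st.1 (n - 1).toNat i.toNat st.2, st.2 + 1))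
      ((PySem.List.pyRange 0 (n - 1) 1).foldl
        (fun (st : List (List Int) × Int) i => (set2 st.1 i.toNat (n - 1).toNat st.2, st.2 + 1))
        (appendA X, (n - 1) ^ 2))).1

def stepsOdd (n : Int) (X : List (List Int)) : List (List Int) :=
  (fun (s2 : List (List Int) × Int) => set2 s2.1 0 0 s2.2)
    ((PySem.List.pyRange 1 n 1).foldl
      (fun (st : List (List Int) × Int) i => (set2 st.1 i.toNat 0 st.2, st.2 + 1))
      ((PySem.List.pyRange 1 n 1).foldl
        (fun (st : List (List Int) × Int) i => (set2 st.1 0 i.toNat st.2, st.2 + 1))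
        (prependA X, (n - 1) ^ 2)))

lemma A_eq_one : max_mex_matrix 1 = [[0]] := by
  rw [max_mex_matrix.eq_def]
  rfl

lemma A_eq_even {n : Int} (hn : 2 ≤ n) (hpar : n % 2 = 0) :
    max_mex_matrix n = stepsEven n (max_mex_matrix (n - 1)) := by
  rw [max_mex_matrix.eq_def, dif_neg (by omega), dif_neg (by omega),
    if_pos (by rw [PySem.Int.mod_eq_emod_of_pos (by norm_num), hpar]; rfl)]
  rfl

lemma A_eq_odd {n : Int} (hn : 2 ≤ n) (hpar : ¬ n % 2 = 0) :
    max_mex_matrix n = stepsOdd n (max_mex_matrix (n - 1)) := by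
  rw [max_mex_matrix.eq_def, dif_neg (by omega), dif_neg (by omega),
    if_neg (by rw [PySem.Int.mod_eq_emod_of_pos (by norm_num)]; simpa using hpar)]
  rfl

lemma Sq_foldl_pair {s : Nat} (L : List Int) (f : List (List Int) → Int → Int → List (List Int))
    (hf : ∀ M i k, Sq M s → Sq (f M i k) s) :
    ∀ (st : List (List Int) × Int), Sq st.1 s →
      Sq ((L.foldl (fun st i => (f st.1 i st.2, st.2 + 1)) st).1) s := by
  induction L with
  | nil => intro st h; exact h
  | cons a L ih =>
    intro st h
    simp only [List.foldl_cons]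
    exact ih (f st.1 a st.2, st.2 + 1) (hf st.1 a st.2 h)

lemma Sq_stepsEven {n : Int} (hn : 2 ≤ n) {X : List (List Int)}
    (hX : Sq X (n - 1).toNat) : Sq (stepsEven n X) n.toNat := by
  have hA : Sq (appendA X) n.toNat := by
    have := Sq_appendA hX (by omega)
    rwa [show (n - 1).toNat + 1 = n.toNat by omega] at this
  unfold stepsEven
  refine Sq_foldl_pair _ (fun M i k => set2 M (n - 1).toNat i.toNat k)
    (fun M i k h => Sq_set2 h _ _ _) _ ?_
  exact Sq_foldl_pair _ (fun M i k => set2 M i.toNat (n - 1).toNat k)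
    (fun M i k h => Sq_set2 h _ _ _) _ hA

lemma Sq_stepsOdd {n : Int} (hn : 2 ≤ n) {X : List (List Int)}
    (hX : Sq X (n - 1).toNat) : Sq (stepsOdd n X) n.toNat := by
  have hA : Sq (prependA X) n.toNat := by
    have := Sq_prependA hX (by omega)
    rwa [show (n - 1).toNat + 1 = n.toNat by omega] at this
  unfold stepsOdd
  refine Sq_set2 ?_ _ _ _
  refine Sq_foldl_pair _ (fun M i k => set2 M i.toNat 0 k)
    (fun M i k h => Sq_set2 h _ _ _) _ ?_
  exact Sq_foldl_pair _ (fun M i k => set2 M 0 i.toNat k)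
    (fun M i k h => Sq_set2 h _ _ _) _ hA

lemma Sq_A : ∀ (c : Nat) (n : Int), n.toNat = c → 1 ≤ n → Sq (max_mex_matrix n) n.toNat := by
  intro c
  induction c using Nat.strong_induction_on with
  | _ c ih =>
    intro n hc h1
    by_cases hn1 : n = 1
    · subst hn1
      rw [A_eq_one]
      refine ⟨rfl, fun k hk => ?_⟩
      have hk0 : k = 0 := by omega
      subst hk0
      rfl
    · have hn2 : 2 ≤ n := by omega
      have ihprev := ih (n - 1).toNat (by omega) (n - 1) rfl (by omega)
      by_cases hpar : n % 2 = 0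
      · rw [A_eq_even hn2 hpar]
        exact Sq_stepsEven hn2 ihprev
      · rw [A_eq_odd hn2 hpar]
        exact Sq_stepsOdd hn2 ihprev

-- one borderwriting step of B, applied to A's embedded (n-1)-matrix, is A's even step embedded
lemma WL_even {n s H : Int} (o : Nat) {X : List (List Int)}
    (hn : 2 ≤ n) (hns : n ≤ s) (hpar : n % 2 = 0)
    (ho : H - PySem.Int.floordiv (n + 1) 2 = (o : Int))
    (hfit : o + n.toNat ≤ s.toNat)
    (hX : Sq X (n - 1).toNat) :
    write_layer (emb o s.toNat X) H n = emb o s.toNat (stepsEven n X) := by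
  have hu : (n - 1).toNat + 1 = n.toNat := by omega
  have hAX : Sq (appendA X) n.toNat := by
    have := Sq_appendA hX (by omega); rwa [hu] at this
  unfold write_layer
  rw [if_pos (by rw [PySem.Int.mod_eq_emod_of_pos (by norm_num), hpar]; rfl)]
  dsimp only
  rw [ho]
  have hcong1 : ∀ (acc : List (List Int)) (x : Int), x ∈ PySem.List.pyRange 0 (n - 1) 1 →
      set2 acc ((o : Int) + x).toNat ((o : Int) + n - 1).toNat ((n - 1) ^ 2 + x)
        = set2 acc (o + x.toNat) (o + (n - 1).toNat) ((n - 1) ^ 2 + (x - 0)) := by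
    intro acc x hx
    rw [PySem.List.mem_pyRange_one] at hx
    rw [show ((o : Int) + x).toNat = o + x.toNat by omega,
      show ((o : Int) + n - 1).toNat = o + (n - 1).toNat by omega,
      show (n - 1) ^ 2 + x = (n - 1) ^ 2 + (x - 0) by ring]
  have hcong2 : ∀ (acc : List (List Int)) (x : Int), x ∈ PySem.List.pyRange 0 n 1 →
      set2 acc ((o : Int) + n - 1).toNat ((o : Int) + x).toNat ((n - 1) ^ 2 + n - 1 + x)
        = set2 acc (o + (n - 1).toNat) (o + x.toNat) ((n - 1) ^ 2 + (n - 1 - 0) + (x - 0)) := by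
    intro acc x hx
    rw [PySem.List.mem_pyRange_one] at hx
    rw [show ((o : Int) + x).toNat = o + x.toNat by omega,
      show ((o : Int) + n - 1).toNat = o + (n - 1).toNat by omega,
      show (n - 1) ^ 2 + n - 1 + x = (n - 1) ^ 2 + (n - 1 - 0) + (x - 0) by ring]
  rw [PySem.List.foldl_congr_mem _ _ _ _ hcong1, PySem.List.foldl_congr_mem _ _ _ _ hcong2,
    ← emb_appendA hX (by omega) (by omega : o + (n - 1).toNat + 1 ≤ s.toNat)]
  rw [foldl_set2_emb (PySem.List.pyRange 0 (n - 1) 1) (fun i => i.toNat) (fun _ => (n - 1).toNat)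
    (fun i => (n - 1) ^ 2 + (i - 0)) hAX hfit
    (fun i hi => by rw [PySem.List.mem_pyRange_one] at hi; refine ⟨?_, ?_⟩ <;> simp only [] <;> omega)]
  rw [foldl_set2_emb (PySem.List.pyRange 0 n 1) (fun _ => (n - 1).toNat) (fun i => i.toNat)
    (fun i => (n - 1) ^ 2 + (n - 1 - 0) + (i - 0))
    (Sq_foldl_set2 _ _ _ _ hAX) hfit
    (fun i hi => by rw [PySem.List.mem_pyRange_one] at hi; refine ⟨?_, ?_⟩ <;> simp only [] <;> omega)]
  unfold stepsEven
  rw [foldl_counter (fun M i k => set2 M i.toNat (n - 1).toNat k) (n - 1).toNat 0 (n - 1)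
    ((n - 1) ^ 2) (by omega) (by omega)]
  rw [foldl_counter (fun M i k => set2 M (n - 1).toNat i.toNat k) n.toNat 0 n
    ((n - 1) ^ 2 + (n - 1 - 0)) (by omega) (by omega)]

lemma WL_odd {n s H : Int} (o : Nat) {X : List (List Int)}
    (hn : 2 ≤ n) (hns : n ≤ s) (hpar : ¬ n % 2 = 0)
    (ho : H - PySem.Int.floordiv (n + 1) 2 = (o : Int))
    (hfit : o + n.toNat ≤ s.toNat)
    (hX : Sq X (n - 1).toNat) :
    write_layer (emb (o + 1) s.toNat X) H n = emb o s.toNat (stepsOdd n X) := by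
  have hu : (n - 1).toNat + 1 = n.toNat := by omega
  have hPX : Sq (prependA X) n.toNat := by
    have := Sq_prependA hX (by omega); rwa [hu] at this
  unfold write_layer
  rw [if_neg (by rw [PySem.Int.mod_eq_emod_of_pos (by norm_num)]; simpa using hpar)]
  dsimp only
  rw [ho]
  have hcong1 : ∀ (acc : List (List Int)) (x : Int), x ∈ PySem.List.pyRange 1 n 1 →
      set2 acc (o : Int).toNat ((o : Int) + x).toNat ((n - 1) ^ 2 + x - 1)
        = set2 acc (o + 0) (o + x.toNat) ((n - 1) ^ 2 + (x - 1)) := by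
    intro acc x hx
    rw [PySem.List.mem_pyRange_one] at hx
    rw [show ((o : Int) + x).toNat = o + x.toNat by omega,
      show (o : Int).toNat = o + 0 by omega,
      show (n - 1) ^ 2 + x - 1 = (n - 1) ^ 2 + (x - 1) by ring]
  have hcong2 : ∀ (acc : List (List Int)) (x : Int), x ∈ PySem.List.pyRange 1 n 1 →
      set2 acc ((o : Int) + x).toNat (o : Int).toNat ((n - 1) ^ 2 + n - 2 + x)
        = set2 acc (o + x.toNat) (o + 0) ((n - 1) ^ 2 + (n - 1) + (x - 1)) := by
    intro acc x hx
    rw [PySem.List.mem_pyRange_one] at hx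
    rw [show ((o : Int) + x).toNat = o + x.toNat by omega,
      show (o : Int).toNat = o + 0 by omega,
      show (n - 1) ^ 2 + n - 2 + x = (n - 1) ^ 2 + (n - 1) + (x - 1) by ring]
  rw [PySem.List.foldl_congr_mem _ _ _ _ hcong1, PySem.List.foldl_congr_mem _ _ _ _ hcong2,
    ← emb_prependA hX (by omega) (by omega : o + (n - 1).toNat + 1 ≤ s.toNat)]
  rw [foldl_set2_emb (PySem.List.pyRange 1 n 1) (fun _ => 0) (fun i => i.toNat)
    (fun i => (n - 1) ^ 2 + (i - 1)) hPX hfit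
    (fun i hi => by rw [PySem.List.mem_pyRange_one] at hi; refine ⟨?_, ?_⟩ <;> simp only [] <;> omega)]
  rw [foldl_set2_emb (PySem.List.pyRange 1 n 1) (fun i => i.toNat) (fun _ => 0)
    (fun i => (n - 1) ^ 2 + (n - 1) + (i - 1))
    (Sq_foldl_set2 _ _ _ _ hPX) hfit
    (fun i hi => by rw [PySem.List.mem_pyRange_one] at hi; refine ⟨?_, ?_⟩ <;> simp only [] <;> omega)]
  rw [show (o : Int).toNat = o + 0 by omega,
    show n * n - 1 = (n - 1) ^ 2 + (n - 1) + (n - 1) by ring]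
  rw [emb_set2 (Sq_foldl_set2 _ _ _ _ (Sq_foldl_set2 _ _ _ _ hPX)) (by omega) (by omega) hfit]
  unfold stepsOdd
  rw [foldl_counter (fun M i k => set2 M 0 i.toNat k) (n - 1).toNat 1 n
    ((n - 1) ^ 2) (by omega) (by omega)]
  rw [foldl_counter (fun M i k => set2 M i.toNat 0 k) (n - 1).toNat 1 n
    ((n - 1) ^ 2 + (n - 1)) (by omega) (by omega)]

-- the main pass lemma: the first layers of B's loop, run with ambient size s,
-- build exactly A's n-matrix embedded at offset (s+1)//2 - (n+1)//2
lemma pass : ∀ (c : Nat) (n s : Int), n.toNat = c → 1 ≤ n → n ≤ s →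
    (PySem.List.pyRange 2 (n + 1) 1).foldl
        (fun M m => write_layer M (PySem.Int.floordiv (s + 1) 2) m)
        (List.replicate s.toNat (List.replicate s.toNat (0 : Int)))
      = emb (PySem.Int.floordiv (s + 1) 2 - PySem.Int.floordiv (n + 1) 2).toNat s.toNat
          (max_mex_matrix n) := by
  intro c
  induction c using Nat.strong_induction_on with
  | _ c ih =>
    intro n s hc h1 hns
    have hfd : ∀ x : Int, PySem.Int.floordiv x 2 = x / 2 :=
      fun x => PySem.Int.floordiv_eq_ediv_of_pos (by norm_num)
    by_cases hn1 : n = 1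
    · subst hn1
      rw [show (1 : Int) + 1 = 2 by norm_num, PySem.List.pyRange_one_eq_nil (le_refl 2)]
      simp only [List.foldl_nil]
      rw [A_eq_one, emb_single_zero (by rw [hfd, hfd]; omega)]
    · have hn2 : 2 ≤ n := by omega
      rw [PySem.List.pyRange_one_succ_right (by omega : (2 : Int) ≤ n), List.foldl_append]
      simp only [List.foldl_cons, List.foldl_nil]
      have ihp := ih (n - 1).toNat (by omega) (n - 1) s rfl (by omega) (by omega)
      rw [show n - 1 + 1 = n by ring] at ihp
      rw [ihp]
      have hSq := Sq_A (n - 1).toNat (n - 1) rfl (by omega)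
      by_cases hpar : n % 2 = 0
      · rw [A_eq_even hn2 hpar,
          show (PySem.Int.floordiv (s + 1) 2 - PySem.Int.floordiv n 2).toNat
            = (PySem.Int.floordiv (s + 1) 2 - PySem.Int.floordiv (n + 1) 2).toNat by
              rw [hfd, hfd, hfd]; omega]
        exact WL_even _ hn2 hns hpar (by rw [hfd, hfd]; omega) (by rw [hfd, hfd]; omega) hSq
      · rw [A_eq_odd hn2 hpar,
          show (PySem.Int.floordiv (s + 1) 2 - PySem.Int.floordiv n 2).toNat
            = (PySem.Int.floordiv (s + 1) 2 - PySem.Int.floordiv (n + 1) 2).toNat + 1 by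
              rw [hfd, hfd, hfd]; omega]
        exact WL_odd _ hn2 hns hpar (by rw [hfd, hfd]; omega) (by rw [hfd, hfd]; omega) hSq


-- ===== VERDICT (by name: the statement is the Claim_ definition above) =====
theorem max_mex_matrix_spec : Claim_equal_max_mex_matrix := by
  intro n _ hpre
  unfold Pre_max_mex_matrix at hpre
  unfold Spec_max_mex_matrix max_mex_matrix_alt
  dsimp only
  rw [List.map_const', PySem.List.length_pyRange_one, show n - 0 = n by ring]
  rw [pass n.toNat n n rfl hpre le_rfl, sub_self, Int.toNat_zero,
    emb_zero_self (Sq_A n.toNat n rfl hpre)]
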